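-- pv_equiv track=rewrite | github.com/Bala-0-1/Python_Projects | Uma san/string_occurence.py | string_occurence_match
-- ===== SOURCE A (Python) =====
-- def string_occurence_match(str1):
--     set1 = set(x for x in str1)
--     length = len(str1)
--     for i in set1:
--         count = 0
--         for j in str1:
--             if i == j:
--                 count+=1
--         if count == (length-count):
--             return "YES"
--     else:
--         return "NO"
-- ===== SOURCE B (Python) =====
-- def string_occurence_match(str1):
--     counts = {}
--     for ch in str1:
--         counts[ch] = counts.get(ch, 0) + 1
--     n = len(str1)
--     for v in counts.values():
--         if 2 * v == n:
--             return "YES"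
--     return "NO"
-- ===== Notes on version B (the rewrite author's own statement) =====
-- stated objective: faster
-- what changed: A rescans the whole string once per distinct character; B builds a frequency dictionary in one pass and then scans its values, so the inner full-string scan disappears.
import Mathlib
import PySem

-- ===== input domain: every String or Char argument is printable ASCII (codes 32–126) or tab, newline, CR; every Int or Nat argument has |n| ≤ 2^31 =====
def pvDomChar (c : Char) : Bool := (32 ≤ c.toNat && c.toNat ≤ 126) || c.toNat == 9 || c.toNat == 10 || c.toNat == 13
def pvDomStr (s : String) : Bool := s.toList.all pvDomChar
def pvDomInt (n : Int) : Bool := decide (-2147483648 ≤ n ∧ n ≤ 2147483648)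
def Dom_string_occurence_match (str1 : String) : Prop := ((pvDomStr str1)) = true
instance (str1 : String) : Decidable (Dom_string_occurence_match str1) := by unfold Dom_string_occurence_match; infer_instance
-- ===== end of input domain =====

-- B replaces A's per-distinct-character full-string rescan with a single-pass frequency
-- dictionary whose values are then scanned once (faster: the inner scan disappears).


-- ===== PORT A =====
-- count = 0; for j in str1: if i == j: count += 1
def aCount (s : List Char) (i : Char) : Int :=
  s.foldl (fun count j => if i == j then count + 1 else count) 0

-- for i in set1: … return "YES"  /  else: return "NO"
def aLoop (s : List Char) (length : Int) : List Char → String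
  | [] => "NO"
  | i :: rest => if aCount s i = length - aCount s i then "YES" else aLoop s length rest

def string_occurence_match (str1 : String) : String :=
  aLoop str1.toList (PySem.Str.len str1) (PySem.Set.ofList str1.toList)

-- ===== PORT B =====
-- for v in counts.values(): if 2 * v == n: return "YES"  /  return "NO"
def bLoop (n : Int) : List Int → String
  | [] => "NO"
  | v :: rest => if 2 * v = n then "YES" else bLoop n rest

-- counts built in one pass: counts[ch] = counts.get(ch, 0) + 1
def string_occurence_match_alt (str1 : String) : String :=
  bLoop (PySem.Str.len str1)
    (PySem.Dict.values
      (str1.toList.foldl (fun d ch => d.insert ch (d.getD ch 0 + 1)) PySem.Dict.empty))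

-- ===== PRECONDITION & SPEC =====
def Spec_string_occurence_match (str1 : String) (out : String) : Prop := out = string_occurence_match_alt str1
instance (str1 : String) (out : String) : Decidable (Spec_string_occurence_match str1 out) := by unfold Spec_string_occurence_match; infer_instance

-- ===== CLAIM (what is proved, stated in full; the proofs are below) =====
def Claim_equal_string_occurence_match : Prop := ∀ (str1 : String), Dom_string_occurence_match str1 → Spec_string_occurence_match str1 (string_occurence_match str1)

-- ===== LEMMAS AND PROOFS =====

theorem aLoop_eq_any (s : List Char) (n : Int) (xs : List Char) :
    aLoop s n xs = if xs.any (fun i => decide (aCount s i = n - aCount s i)) then "YES" else "NO" := by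
  induction xs with
  | nil => simp [aLoop]
  | cons i rest ih =>
    show (if aCount s i = n - aCount s i then "YES" else aLoop s n rest) = _
    rw [List.any_cons, ih]
    by_cases h : aCount s i = n - aCount s i
    · rw [if_pos h, decide_eq_true h]
      simp
    · rw [if_neg h, decide_eq_false h]
      simp

theorem bLoop_eq_any (n : Int) (vs : List Int) :
    bLoop n vs = if vs.any (fun v => decide (2 * v = n)) then "YES" else "NO" := by
  induction vs with
  | nil => simp [bLoop]
  | cons v rest ih =>
    show (if 2 * v = n then "YES" else bLoop n rest) = _
    rw [List.any_cons, ih]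
    by_cases h : 2 * v = n
    · rw [if_pos h, decide_eq_true h]
      simp
    · rw [if_neg h, decide_eq_false h]
      simp

theorem aCount_eq_count (s : List Char) (i : Char) : aCount s i = (s.count i : Int) := by
  unfold aCount
  rw [PySem.List.foldl_if_add_one]
  simp [List.count_eq_countP]
  congr 1
  funext j
  simp [eq_comm]

-- ===== VERDICT (by name: the statement is the Claim_ definition above) =====
theorem string_occurence_match_spec : Claim_equal_string_occurence_match := by
  intro str1 _
  unfold Spec_string_occurence_match string_occurence_match string_occurence_match_alt
  rw [aLoop_eq_any, PySem.Dict.foldl_insert_getD_add_one_eq_counter, bLoop_eq_any]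
  have hvals : (PySem.Dict.counter str1.toList).values
      = (PySem.Set.ofList str1.toList).map (fun k => (str1.toList.count k : Int)) := by
    show (PySem.Dict.counter str1.toList).items.map (·.2) = _
    rw [PySem.Dict.items_counter]
    simp
  rw [hvals, List.any_map]
  have hany : ∀ (l : List Char),
      (l.any fun i => decide (aCount str1.toList i = PySem.Str.len str1 - aCount str1.toList i))
        = l.any ((fun v => decide (2 * v = PySem.Str.len str1)) ∘ fun k => (str1.toList.count k : Int)) := by
    intro l
    apply PySem.List.any_congr_mem
    intro x _
    simp [aCount_eq_count]
    omega
  rw [hany]
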